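-- pv_equiv track=rewrite | github.com/MinChoi0129/Algorithm_Problems | 2020kakao자물쇠와열쇠.py | getFourKeys
-- ===== SOURCE A (Python) =====
-- from copy import deepcopy
--
-- def getFourKeys(key):
--     keys =  [key]
--     N = len(key)
--     for _ in range(3): keys.append(deepcopy(key))
--
--     # 90'
--     for r in range(N):
--         for c in range(N):
--             keys[1][c][N-1-r] = key[r][c]
--
--     # 180'
--     for r in range(N):
--         for c in range(N):
--             keys[2][N-1-r][N-1-c] = key[r][c]
--
--     # 270'
--     for r in range(N):
--         for c in range(N):
--             keys[3][N-1-c][r] = key[r][c]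
--
--     return keys
-- ===== SOURCE B (Python) =====
-- def getFourKeys(key):
--     result = [key]
--     cur = key
--     for _ in range(3):
--         cur = [[row[c] for row in reversed(cur)] for c in range(len(cur))]
--         result.append(cur)
--     return result
-- ===== Notes on version B (the rewrite author's own statement) =====
-- stated objective: simpler
-- what changed: Each rotation is derived from the previous one by a single reversed-transpose comprehension in a three-step loop, instead of filling three deep copies cell by cell with three separate explicit index formulas; deepcopy disappears.
-- intended difference: On keys with a row wider than the matrix is tall, A returns matrices that keep the stale trailing cells of its deep copies next to the rotated N-by-N block (an accident of mutating copies in place); B returns the four quarter-turn rotations of the leading N-by-N block, the intended value since only that block is ever rotated. — e.g. on getFourKeys([[1, 2, 3], [4, 5, 6]]): A returns [[[1, 2, 3], [4, 5, 6]], [[4, 1, 3], [5, 2, 6]], [[5, 4, 3], [2, 1, 6]], [[2, 5, 3], [1, 4, 6]]], B returns [[[1, 2, 3], [4, 5, 6]], [[4, 1], [5, 2]], [[5, 4], [2, 1]], [[2, 5], [1, 4]]]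
import Mathlib
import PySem

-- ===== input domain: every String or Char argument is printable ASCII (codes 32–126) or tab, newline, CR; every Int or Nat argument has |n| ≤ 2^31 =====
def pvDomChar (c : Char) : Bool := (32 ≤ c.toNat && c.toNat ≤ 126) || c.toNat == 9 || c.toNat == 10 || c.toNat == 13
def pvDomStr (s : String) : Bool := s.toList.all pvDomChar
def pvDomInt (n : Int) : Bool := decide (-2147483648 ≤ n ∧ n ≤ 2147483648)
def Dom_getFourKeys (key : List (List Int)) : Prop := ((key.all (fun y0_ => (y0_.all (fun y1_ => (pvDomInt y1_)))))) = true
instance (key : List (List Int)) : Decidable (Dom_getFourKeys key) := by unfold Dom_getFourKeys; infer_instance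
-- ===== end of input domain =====

-- B derives each rotation from the previous one by reverse-then-transpose instead of filling
-- three deep copies cell by cell with explicit index formulas (objective: simpler).
-- A returns the very input list object as keys[0] and never mutates it; the equivalence is about values.

-- ===== PORT A =====
-- key[r][c] read; under Pre_ every index is in range, so getD is exact.
def aGet (m : List (List Int)) (i j : Nat) : Int := (m.getD i []).getD j 0
-- keys[k][i][j] = v; under Pre_ the indices are in range, so List.set is exact.
def aSet (m : List (List Int)) (i j : Nat) (v : Int) : List (List Int) :=
  m.set i ((m.getD i []).set j v)
-- 'for r in range(N): for c in range(N): acc = f acc r c'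
def loop2 (N : Nat) (f : List (List Int) → Nat → Nat → List (List Int))
    (init : List (List Int)) : List (List Int) :=
  (List.range N).foldl (fun acc r => (List.range N).foldl (fun acc c => f acc r c) acc) init

def getFourKeys (key : List (List Int)) : List (List (List Int)) :=
  let N := key.length
  -- keys = [key] + three deepcopies of key, then the three write passes
  let k1 := loop2 N (fun acc r c => aSet acc c (N-1-r) (aGet key r c)) key      -- 90'
  let k2 := loop2 N (fun acc r c => aSet acc (N-1-r) (N-1-c) (aGet key r c)) key -- 180'
  let k3 := loop2 N (fun acc r c => aSet acc (N-1-c) r (aGet key r c)) key       -- 270'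
  [key, k1, k2, k3]

-- ===== PORT B =====
-- cur = [[row[c] for row in reversed(cur)] for c in range(len(cur))]
-- row[c] is read with getD; exact wherever the Python comprehension returns (c < len(row),
-- which Pre_ guarantees since every row is at least len(cur) wide).
def rotB (m : List (List Int)) : List (List Int) :=
  (List.range m.length).map (fun c => m.reverse.map (fun row => row.getD c 0))

def getFourKeys_alt (key : List (List Int)) : List (List (List Int)) :=
  ((List.range 3).foldl
    (fun (st : List (List (List Int)) × List (List Int)) _ =>
      let cur := rotB st.2
      (st.1 ++ [cur], cur))
    ([key], key)).1

-- ===== PRECONDITION & SPEC =====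
-- Pre_ is exactly where A returns: A raises IndexError as soon as some row is shorter than
-- the matrix height (it writes column N-1 of every copied row).
def Pre_getFourKeys (key : List (List Int)) : Prop :=
  ∀ row ∈ key, key.length ≤ row.length
instance (key : List (List Int)) : Decidable (Pre_getFourKeys key) := by
  unfold Pre_getFourKeys; infer_instance

def pvWitness_getFourKeys : List (List Int) := [[1, 2], [3, 4]]

-- On keys with a row wider than the matrix is tall, A returns matrices that keep the stale
-- trailing cells of its deep copies next to the rotated N-by-N block, an accident of mutating
-- copies in place; B returns the four quarter-turn rotations of the leading N-by-N block,
-- the intended value (only that block is ever rotated).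
def D_getFourKeys (key : List (List Int)) : Prop :=
  ∃ row ∈ key, row.length ≠ key.length
instance (key : List (List Int)) : Decidable (D_getFourKeys key) := by
  unfold D_getFourKeys; infer_instance

def Spec_getFourKeys (key : List (List Int)) (out : List (List (List Int))) : Prop := ¬ D_getFourKeys key → out = getFourKeys_alt key
instance (key : List (List Int)) (out : List (List (List Int))) : Decidable (Spec_getFourKeys key out) := by unfold Spec_getFourKeys; infer_instance

def pvDiffWitness_getFourKeys : List (List Int) := [[1, 2, 3], [4, 5, 6]]
def pvDiffWitnessOut_getFourKeys : (List (List (List Int))) × (List (List (List Int))) :=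
  ([[[1, 2, 3], [4, 5, 6]], [[4, 1, 3], [5, 2, 6]], [[5, 4, 3], [2, 1, 6]], [[2, 5, 3], [1, 4, 6]]],
   [[[1, 2, 3], [4, 5, 6]], [[4, 1], [5, 2]], [[5, 4], [2, 1]], [[2, 5], [1, 4]]])

-- ===== CLAIM (what is proved, stated in full; the proofs are below) =====
def Claim_unchanged_getFourKeys : Prop := ∀ (key : List (List Int)), Dom_getFourKeys key → Pre_getFourKeys key → Spec_getFourKeys key (getFourKeys key)
def Claim_changed_getFourKeys : Prop := Dom_getFourKeys (pvDiffWitness_getFourKeys) ∧ Pre_getFourKeys (pvDiffWitness_getFourKeys) ∧ D_getFourKeys (pvDiffWitness_getFourKeys) ∧ getFourKeys (pvDiffWitness_getFourKeys) = pvDiffWitnessOut_getFourKeys.1 ∧ getFourKeys_alt (pvDiffWitness_getFourKeys) = pvDiffWitnessOut_getFourKeys.2 ∧ pvDiffWitnessOut_getFourKeys.1 ≠ pvDiffWitnessOut_getFourKeys.2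

-- ===== LEMMAS AND PROOFS =====

-- "m is an N×N matrix", phrased through getD so it survives aSet
def Sq (N : Nat) (m : List (List Int)) : Prop :=
  m.length = N ∧ ∀ k < N, (m.getD k []).length = N

-- the target shape: entry (i,j) is f i j
def mkM (N : Nat) (f : Nat → Nat → Int) : List (List Int) :=
  (List.range N).map (fun i => (List.range N).map (fun j => f i j))

lemma getD_set_list {α : Type} (m : List α) (i k : Nat) (r d : α) :
    (m.set i r).getD k d = if i = k ∧ i < m.length then r else m.getD k d := by
  simp only [List.getD, List.getElem?_set]
  by_cases hik : i = k
  · subst hik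
    by_cases hl : i < m.length
    · simp [hl]
    · simp [hl]
  · simp [hik]

lemma sq_pre {key : List (List Int)} (h : ∀ row ∈ key, row.length = key.length) : Sq key.length key := by
  refine ⟨rfl, fun k hk => ?_⟩
  have : key.getD k [] = key[k] := List.getD_eq_getElem key [] hk
  rw [this]
  exact h _ (List.getElem_mem hk)

lemma sq_aSet {N : Nat} {m : List (List Int)} (h : Sq N m) (i j : Nat) (v : Int) :
    Sq N (aSet m i j v) := by
  obtain ⟨hl, hr⟩ := h
  refine ⟨by simp [aSet, hl], fun k hk => ?_⟩
  rw [aSet, getD_set_list]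
  split_ifs with hc
  · obtain ⟨rfl, -⟩ := hc
    rw [List.length_set]
    exact hr _ hk
  · exact hr k hk

lemma aGet_aSet_same {N : Nat} {m : List (List Int)} (h : Sq N m) {i j : Nat}
    (hi : i < N) (hj : j < N) (v : Int) : aGet (aSet m i j v) i j = v := by
  obtain ⟨hl, hr⟩ := h
  have hil : i < m.length := hl ▸ hi
  have hjl : j < (m.getD i []).length := (hr i hi) ▸ hj
  rw [aGet, aSet, getD_set_list, if_pos ⟨rfl, hil⟩, getD_set_list, if_pos ⟨rfl, hjl⟩]

lemma aGet_aSet_ne {m : List (List Int)} {i j k l : Nat} (h : (i, j) ≠ (k, l)) (v : Int) :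
    aGet (aSet m i j v) k l = aGet m k l := by
  rw [aGet, aSet, getD_set_list, aGet]
  split_ifs with hc
  · obtain ⟨hik, _⟩ := hc
    subst hik
    have hjl : j ≠ l := by rintro rfl; exact h rfl
    rw [getD_set_list]
    simp [hjl]
  · rfl

-- all (r,c) with r,c < N, in A's traversal order
def pairsL (N : Nat) : List (Nat × Nat) :=
  (List.range N).flatMap (fun r => (List.range N).map (fun c => (r, c)))

lemma foldl_flatMap {α β γ : Type} (l : List α) (g : α → List β) (f : γ → β → γ) :
    ∀ init, (l.flatMap g).foldl f init = l.foldl (fun a x => (g x).foldl f a) init := by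
  induction l with
  | nil => intro init; rfl
  | cons a t ih => intro init; simp [List.flatMap_cons, List.foldl_append, ih]

lemma loop2_eq (N : Nat) (f : List (List Int) → Nat → Nat → List (List Int))
    (init : List (List Int)) :
    loop2 N f init = (pairsL N).foldl (fun acc p => f acc p.1 p.2) init := by
  rw [loop2, pairsL, foldl_flatMap]
  simp [List.foldl_map]

lemma mem_pairsL {N : Nat} {p : Nat × Nat} : p ∈ pairsL N ↔ p.1 < N ∧ p.2 < N := by
  obtain ⟨a, b⟩ := p
  simp only [pairsL, List.mem_flatMap, List.mem_map, List.mem_range]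
  constructor
  · rintro ⟨r, hr, c, hc, h⟩; cases h; exact ⟨hr, hc⟩
  · rintro ⟨ha, hb⟩; exact ⟨a, ha, b, hb, rfl⟩

lemma nodup_pairsL (N : Nat) : (pairsL N).Nodup := by
  have : pairsL N = (List.range N) ×ˢ (List.range N) := rfl
  rw [this]
  exact List.Nodup.product (List.nodup_range) (List.nodup_range)

lemma pairwise_w {N : Nat} (w : Nat × Nat → Nat × Nat)
    (hinj : ∀ p q : Nat × Nat, p.1 < N → p.2 < N → q.1 < N → q.2 < N → w p = w q → p = q) :
    (pairsL N).Pairwise (fun p q => w p ≠ w q) := by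
  have hnd : ((pairsL N).map w).Nodup := by
    refine List.Nodup.map_on ?_ (nodup_pairsL N)
    intro x hx y hy hxy
    have hx' := mem_pairsL.mp hx
    have hy' := mem_pairsL.mp hy
    exact hinj x y hx'.1 hx'.2 hy'.1 hy'.2 hxy
  rw [List.Nodup, List.pairwise_map] at hnd
  exact hnd

lemma sq_foldl {N : Nat} (w : Nat × Nat → Nat × Nat) (key : List (List Int))
    (ps : List (Nat × Nat)) :
    ∀ m, Sq N m →
      Sq N (ps.foldl (fun acc p => aSet acc (w p).1 (w p).2 (aGet key p.1 p.2)) m) := by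
  induction ps with
  | nil => intro m hm; exact hm
  | cons a t ih => intro m hm; exact ih _ (sq_aSet hm _ _ _)

lemma writes_get {N : Nat} (w : Nat × Nat → Nat × Nat) (key : List (List Int))
    (ps : List (Nat × Nat)) :
    ∀ m, Sq N m →
      (∀ p ∈ ps, (w p).1 < N ∧ (w p).2 < N) →
      ps.Pairwise (fun p q => w p ≠ w q) →
      ∀ i j, i < N → j < N →
      aGet (ps.foldl (fun acc p => aSet acc (w p).1 (w p).2 (aGet key p.1 p.2)) m) i j
        = (match ps.find? (fun p => decide ((w p).1 = i ∧ (w p).2 = j)) with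
           | some p => aGet key p.1 p.2
           | none => aGet m i j) := by
  induction ps with
  | nil => intro m _ _ _ i j _ _; rfl
  | cons a t ih =>
    intro m hm hb hpw i j hi hj
    have hba := hb a (List.mem_cons_self)
    have hbt : ∀ p ∈ t, (w p).1 < N ∧ (w p).2 < N := fun p hp => hb p (List.mem_cons_of_mem _ hp)
    have hpa : ∀ q ∈ t, w a ≠ w q := (List.pairwise_cons.mp hpw).1
    have hpt := (List.pairwise_cons.mp hpw).2
    set m' := aSet m (w a).1 (w a).2 (aGet key a.1 a.2) with hm'def
    have hm' : Sq N m' := sq_aSet hm _ _ _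
    have step := ih m' hm' hbt hpt i j hi hj
    simp only [List.foldl_cons, List.find?_cons]
    by_cases hwa : (w a).1 = i ∧ (w a).2 = j
    · have hpred : (decide ((w a).1 = i ∧ (w a).2 = j)) = true := by simp [hwa]
      rw [step, hpred]
      have hnone : t.find? (fun p => decide ((w p).1 = i ∧ (w p).2 = j)) = none := by
        apply List.find?_eq_none.mpr
        intro q hq
        simp only [decide_eq_true_eq]
        intro hq'
        exact hpa q hq (by
          have e1 : w a = (i, j) := Prod.ext hwa.1 hwa.2
          have e2 : w q = (i, j) := Prod.ext hq'.1 hq'.2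
          rw [e1, e2])
      rw [hnone]
      have : aGet m' i j = aGet key a.1 a.2 := by
        rw [hm'def, ← hwa.1, ← hwa.2]
        exact aGet_aSet_same hm (hwa.1 ▸ hba.1) (hwa.2 ▸ hba.2) _
      simpa using this
    · have hpred : (decide ((w a).1 = i ∧ (w a).2 = j)) = false := by simp [hwa]
      rw [step, hpred]
      cases hf : t.find? (fun p => decide ((w p).1 = i ∧ (w p).2 = j)) with
      | some p => simp
      | none =>
        have : aGet m' i j = aGet m i j := by
          rw [hm'def]
          exact aGet_aSet_ne (by
            intro hcc
            have e1 : (w a).1 = i := congrArg Prod.fst hcc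
            have e2 : (w a).2 = j := congrArg Prod.snd hcc
            exact hwa ⟨e1, e2⟩) _
        simpa using this

lemma aGet_mk {N : Nat} (f : Nat → Nat → Int) {i j : Nat} (hi : i < N) (hj : j < N) :
    aGet (mkM N f) i j = f i j := by
  rw [aGet, mkM]
  have h1 : ((List.range N).map (fun i => (List.range N).map (fun j => f i j))).getD i []
      = (List.range N).map (fun j => f i j) := by
    rw [List.getD_eq_getElem _ _ (by simpa using hi)]
    simp
  rw [h1, List.getD_eq_getElem _ _ (by simpa using hj)]
  simp

lemma sq_mk (N : Nat) (f : Nat → Nat → Int) : Sq N (mkM N f) := by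
  refine ⟨by simp [mkM], fun k hk => ?_⟩
  rw [mkM, List.getD_eq_getElem _ _ (by simpa using hk)]
  simp

lemma mk_ext {N : Nat} {m : List (List Int)} (hm : Sq N m) (f : Nat → Nat → Int)
    (h : ∀ i j, i < N → j < N → aGet m i j = f i j) : m = mkM N f := by
  obtain ⟨hl, hr⟩ := hm
  apply List.ext_getElem
  · simp [mkM, hl]
  · intro i h1 h2
    have hi : i < N := hl ▸ h1
    apply List.ext_getElem
    · have := hr i hi
      rw [List.getD_eq_getElem _ _ h1] at this
      simp [mkM, this]
    · intro j hj1 hj2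
      have hj : j < N := by
        have := hr i hi
        rw [List.getD_eq_getElem _ _ h1] at this
        omega
    -- reduce both sides to aGet / f
      have hlhs : m[i][j] = aGet m i j := by
        rw [aGet, List.getD_eq_getElem _ _ h1, List.getD_eq_getElem _ _ hj1]
      have hrhs : (mkM N f)[i][j] = f i j := by
        have := aGet_mk (N := N) f hi hj
        rw [aGet] at this
        have hg1 : (mkM N f).getD i [] = (mkM N f)[i] := List.getD_eq_getElem _ _ h2
        have hg2 : ((mkM N f)[i]).getD j 0 = (mkM N f)[i][j] := List.getD_eq_getElem _ _ hj2
        rw [hg1, hg2] at this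
        exact this
      rw [hlhs, hrhs]
      exact h i j hi hj

-- find? over pairsL picks the unique preimage
lemma find?_unique {α : Type} (p : α → Bool) (l : List α) (a : α)
    (ha : a ∈ l) (hp : p a = true) (hu : ∀ b ∈ l, p b = true → b = a) :
    l.find? p = some a := by
  cases hf : l.find? p with
  | none => exact absurd hp (by simpa using List.find?_eq_none.mp hf a ha)
  | some b =>
    have hb := List.find?_some hf
    have hbm := List.mem_of_find?_eq_some hf
    rw [hu b hbm hb]

-- generic single-pass lemma: A's pass with write map w equals mkM N g, when w is a
-- bijection of the index square with inverse described by (g, inv)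
lemma pass_eq {N : Nat} (key : List (List Int)) (hSq : Sq N key)
    (w : Nat × Nat → Nat × Nat) (inv : Nat → Nat → Nat × Nat)
    (hwb : ∀ p : Nat × Nat, p.1 < N → p.2 < N → (w p).1 < N ∧ (w p).2 < N)
    (hinj : ∀ p q : Nat × Nat, p.1 < N → p.2 < N → q.1 < N → q.2 < N → w p = w q → p = q)
    (hinv : ∀ i j, i < N → j < N → (inv i j).1 < N ∧ (inv i j).2 < N ∧ w (inv i j) = (i, j)) :
    (pairsL N).foldl (fun acc p => aSet acc (w p).1 (w p).2 (aGet key p.1 p.2)) key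
      = mkM N (fun i j => aGet key (inv i j).1 (inv i j).2) := by
  apply mk_ext (sq_foldl w key (pairsL N) key hSq)
  intro i j hi hj
  rw [writes_get w key (pairsL N) key hSq
      (fun p hp => hwb p (mem_pairsL.mp hp).1 (mem_pairsL.mp hp).2)
      (pairwise_w w hinj) i j hi hj]
  obtain ⟨h1, h2, h3⟩ := hinv i j hi hj
  have hfind : (pairsL N).find? (fun p => decide ((w p).1 = i ∧ (w p).2 = j))
      = some (inv i j) := by
    apply find?_unique
    · exact mem_pairsL.mpr ⟨h1, h2⟩
    · simp [h3]
    · intro b hb hbp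
      have hb' := mem_pairsL.mp hb
      simp only [decide_eq_true_eq] at hbp
      exact hinj b (inv i j) hb'.1 hb'.2 h1 h2
        (by rw [h3]; exact Prod.ext hbp.1 hbp.2)
  rw [hfind]

-- ===== B side =====

lemma rotB_eq {N : Nat} {m : List (List Int)} (hm : Sq N m) :
    rotB m = mkM N (fun i j => aGet m (N - 1 - j) i) := by
  have hml : m.length = N := hm.1
  rw [rotB, hml, mkM]
  apply List.map_congr_left
  intro c hc
  have hcN : c < N := List.mem_range.mp hc
  apply List.ext_getElem
  · simp [hml]
  · intro j h1 h2
    have hjN : j < N := by simpa [hml] using h1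
    rw [List.getElem_map, List.getElem_map, List.getElem_range]
    rw [List.getElem_reverse]
    have hidx : m.length - 1 - j = N - 1 - j := by omega
    rw [← List.getD_eq_getElem m [] (show m.length - 1 - j < m.length by omega), hidx]
    rfl

lemma alt_unfold (key : List (List Int)) :
    getFourKeys_alt key = [key, rotB key, rotB (rotB key), rotB (rotB (rotB key))] := rfl

lemma mk_congr {N : Nat} (f g : Nat → Nat → Int)
    (h : ∀ i j, i < N → j < N → f i j = g i j) : mkM N f = mkM N g := by
  rw [mkM, mkM]
  apply List.map_congr_left
  intro i hi
  apply List.map_congr_left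
  intro j hj
  exact h i j (List.mem_range.mp hi) (List.mem_range.mp hj)

-- ===== VERDICT (by name: the statement is the Claim_ definition above) =====
theorem getFourKeys_spec : Claim_unchanged_getFourKeys := by
  intro key _ hPre
  unfold Spec_getFourKeys
  intro hnD
  have hPre : ∀ row ∈ key, row.length = key.length := by
    intro row hr
    by_contra hne
    exact hnD ⟨row, hr, hne⟩
  set N := key.length with hN
  have hSq : Sq N key := sq_pre hPre
  -- the three rotation entry formulas
  have hf1 : rotB key = mkM N (fun i j => aGet key (N - 1 - j) i) := rotB_eq hSq
  have hf2 : rotB (rotB key) = mkM N (fun i j => aGet key (N - 1 - i) (N - 1 - j)) := by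
    rw [hf1, rotB_eq (sq_mk N _)]
    apply mk_congr
    intro i j hi hj
    rw [aGet_mk _ (by omega) hi]
  have hf3 : rotB (rotB (rotB key)) = mkM N (fun i j => aGet key j (N - 1 - i)) := by
    rw [hf2, rotB_eq (sq_mk N _)]
    apply mk_congr
    intro i j hi hj
    rw [aGet_mk _ (by omega) hi]
    congr 1
    omega
  -- A's three passes
  have hk1 : loop2 N (fun acc r c => aSet acc c (N-1-r) (aGet key r c)) key
      = mkM N (fun i j => aGet key (N - 1 - j) i) := by
    rw [loop2_eq]
    exact pass_eq key hSq (fun p => (p.2, N - 1 - p.1)) (fun i j => (N - 1 - j, i))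
      (fun p h1 h2 => ⟨h2, by dsimp only; omega⟩)
      (fun p q h1 h2 h3 h4 he => by
        have e1 := congrArg Prod.fst he
        have e2 := congrArg Prod.snd he
        simp at e1 e2
        exact Prod.ext (by omega) e1)
      (fun i j hi hj => ⟨by dsimp only; omega, hi, by dsimp only; rw [Prod.mk.injEq]; constructor <;> [skip; omega]; rfl⟩)
  have hk2 : loop2 N (fun acc r c => aSet acc (N-1-r) (N-1-c) (aGet key r c)) key
      = mkM N (fun i j => aGet key (N - 1 - i) (N - 1 - j)) := by
    rw [loop2_eq]
    exact pass_eq key hSq (fun p => (N - 1 - p.1, N - 1 - p.2)) (fun i j => (N - 1 - i, N - 1 - j))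
      (fun p h1 h2 => ⟨by dsimp only; omega, by dsimp only; omega⟩)
      (fun p q h1 h2 h3 h4 he => by
        have e1 := congrArg Prod.fst he
        have e2 := congrArg Prod.snd he
        simp at e1 e2
        exact Prod.ext (by omega) (by omega))
      (fun i j hi hj => ⟨by dsimp only; omega, by dsimp only; omega, by dsimp only; rw [Prod.mk.injEq]; constructor <;> omega⟩)
  have hk3 : loop2 N (fun acc r c => aSet acc (N-1-c) r (aGet key r c)) key
      = mkM N (fun i j => aGet key j (N - 1 - i)) := by
    rw [loop2_eq]
    exact pass_eq key hSq (fun p => (N - 1 - p.2, p.1)) (fun i j => (j, N - 1 - i))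
      (fun p h1 h2 => ⟨by dsimp only; omega, h1⟩)
      (fun p q h1 h2 h3 h4 he => by
        have e1 := congrArg Prod.fst he
        have e2 := congrArg Prod.snd he
        simp at e1 e2
        exact Prod.ext e2 (by omega))
      (fun i j hi hj => ⟨hj, by dsimp only; omega, by dsimp only; rw [Prod.mk.injEq]; constructor <;> [omega; rfl]⟩)
  show getFourKeys key = getFourKeys_alt key
  rw [alt_unfold, hf3, hf2, hf1, getFourKeys]
  simp only [← hN]
  rw [hk1, hk2, hk3]

theorem getFourKeys_changed : Claim_changed_getFourKeys := by
  unfold Claim_changed_getFourKeys; decide
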